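-- pv_equiv track=rewrite | github.com/public-arch/Marithmetics | sm/sm_math_model_demo_v1.py | twin_counts_in_intervals
-- ===== SOURCE A (Python) =====
-- def prefix_sum(arr):
--     ps = [0]
--     s = 0
--     for x in arr:
--         s += x
--         ps.append(s)
--     return ps
--
-- def twin_counts_in_intervals(twin_left, H, X_min, X_max, stride):
--     N = len(twin_left)
--     X_max = min(X_max, N-2)
--     ps = prefix_sum(twin_left)
--     counts = []
--     X = X_min
--     while X + H <= X_max:
--         left = X
--         right = X + H - 2
--         if right+1 >= len(ps):
--             break
--         T = ps[right+1] - ps[left]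
--         counts.append(T)
--         X += stride
--     return counts
-- ===== SOURCE B (Python) =====
-- def twin_counts_in_intervals(twin_left, H, X_min, X_max, stride):
--     M = min(X_max, len(twin_left) - 2)
--     if X_min + H > M:
--         return []
--     k = (M - H - X_min) // stride + 1
--     return [sum(twin_left[X_min + i * stride : X_min + i * stride + H - 1])
--             for i in range(k)]
-- ===== Notes on version B (the rewrite author's own statement) =====
-- stated objective: simpler
-- what changed: Replaces the prefix-sum table plus while-loop with O(1) index queries by a closed-form window count and direct per-window slice sums (one comprehension, no helper); it never builds the O(n) prefix table, so it is measurably faster when the windows cover only part of the array.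
-- outside the precondition, e.g. on twin_counts_in_intervals([1, 2, 3, 4, 5], 2, -1, 10, 100): A returns [-15], B returns [0]; on twin_counts_in_intervals([1, 2, 3], 0, 0, 5, 10): A returns [6], B returns [3]
import Mathlib
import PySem

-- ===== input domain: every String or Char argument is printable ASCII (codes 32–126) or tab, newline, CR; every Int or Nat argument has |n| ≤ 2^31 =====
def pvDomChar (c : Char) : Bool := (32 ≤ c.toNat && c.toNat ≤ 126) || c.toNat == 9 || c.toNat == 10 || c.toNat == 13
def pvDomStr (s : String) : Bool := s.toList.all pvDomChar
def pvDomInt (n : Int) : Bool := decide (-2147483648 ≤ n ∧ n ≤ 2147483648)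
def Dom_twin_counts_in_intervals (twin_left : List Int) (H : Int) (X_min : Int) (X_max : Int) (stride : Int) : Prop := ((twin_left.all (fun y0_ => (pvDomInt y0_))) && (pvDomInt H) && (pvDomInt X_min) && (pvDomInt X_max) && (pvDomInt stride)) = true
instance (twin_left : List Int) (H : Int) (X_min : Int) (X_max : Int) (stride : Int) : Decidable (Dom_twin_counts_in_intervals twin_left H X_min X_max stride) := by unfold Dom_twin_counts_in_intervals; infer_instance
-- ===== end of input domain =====

-- B replaces A's prefix-sum table and while-loop by a closed-form window count and direct
-- per-window slice sums: a simpler single comprehension with no helper (same return value on Pre_).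


-- ===== PORT A =====
-- prefix_sum(arr): ps = [0]; s = 0; for x in arr: s += x; ps.append(s)
def pvPrefixSum (arr : List Int) : List Int :=
  (arr.foldl (fun (st : List Int × Int) x => (st.1 ++ [st.2 + x], st.2 + x)) ([0], 0)).1

-- the while loop of A; fuel only makes the recursion total (Python diverges for stride ≤ 0),
-- the supplied fuel is sufficient whenever stride ≥ 1; pyGet? none = IndexError (outside Pre_)
def pvLoopA (ps : List Int) (H X_max stride : Int) (fuel : Nat) (X : Int) (counts : List Int) : List Int :=
  match fuel with
  | 0 => counts
  | Nat.succ fuel' =>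
    if X + H ≤ X_max then
      let left := X
      let right := X + H - 2
      if right + 1 ≥ (ps.length : Int) then counts
      else
        match PySem.List.pyGet? ps (right + 1), PySem.List.pyGet? ps left with
        | some a, some b => pvLoopA ps H X_max stride fuel' (X + stride) (counts ++ [a - b])
        | _, _ => counts
    else counts

def twin_counts_in_intervals (twin_left : List Int) (H : Int) (X_min : Int) (X_max : Int) (stride : Int) : List Int :=
  let N : Int := twin_left.length
  let X_max' := min X_max (N - 2)
  let ps := pvPrefixSum twin_left
  pvLoopA ps H X_max' stride (X_max' - H - X_min + 1).toNat X_min []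

-- ===== PORT B =====
def twin_counts_in_intervals_alt (twin_left : List Int) (H : Int) (X_min : Int) (X_max : Int) (stride : Int) : List Int :=
  let M := min X_max ((twin_left.length : Int) - 2)
  if M < X_min + H then []
  else
    let k := PySem.Int.floordiv (M - H - X_min) stride + 1
    (List.range k.toNat).map (fun (i : Nat) =>
      (PySem.List.slice twin_left (some (X_min + (i : Int) * stride))
        (some (X_min + (i : Int) * stride + H - 1))).sum)

-- ===== PRECONDITION & SPEC =====
-- Pre_ excludes only runs whose window loop is actually entered with a negative start X_min,
-- non-positive width H or non-positive stride: there A diverges (stride ≤ 0), raises IndexError,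
-- or returns accidental values of Python's negative-index wraparound into the prefix-sum table.
def Pre_twin_counts_in_intervals (twin_left : List Int) (H : Int) (X_min : Int) (X_max : Int) (stride : Int) : Prop :=
  X_min + H ≤ min X_max ((twin_left.length : Int) - 2) → (0 ≤ X_min ∧ 1 ≤ H ∧ 1 ≤ stride)
instance (twin_left : List Int) (H : Int) (X_min : Int) (X_max : Int) (stride : Int) : Decidable (Pre_twin_counts_in_intervals twin_left H X_min X_max stride) := by unfold Pre_twin_counts_in_intervals; infer_instance

def pvWitness_twin_counts_in_intervals : List Int × Int × Int × Int × Int := ([1, 2, 3, 4, 5], 2, 0, 10, 1)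

def Spec_twin_counts_in_intervals (twin_left : List Int) (H : Int) (X_min : Int) (X_max : Int) (stride : Int) (out : List Int) : Prop := out = twin_counts_in_intervals_alt twin_left H X_min X_max stride
instance (twin_left : List Int) (H : Int) (X_min : Int) (X_max : Int) (stride : Int) (out : List Int) : Decidable (Spec_twin_counts_in_intervals twin_left H X_min X_max stride out) := by unfold Spec_twin_counts_in_intervals; infer_instance

-- ===== CLAIM (what is proved, stated in full; the proofs are below) =====
def Claim_equal_twin_counts_in_intervals : Prop := ∀ (twin_left : List Int) (H : Int) (X_min : Int) (X_max : Int) (stride : Int), Dom_twin_counts_in_intervals twin_left H X_min X_max stride → Pre_twin_counts_in_intervals twin_left H X_min X_max stride → Spec_twin_counts_in_intervals twin_left H X_min X_max stride (twin_counts_in_intervals twin_left H X_min X_max stride)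

-- ===== LEMMAS AND PROOFS =====

lemma pvPrefixSum_fold (arr : List Int) : ∀ (acc : List Int) (s : Int),
    (arr.foldl (fun (st : List Int × Int) x => (st.1 ++ [st.2 + x], st.2 + x)) (acc, s)).1
      = acc ++ (List.range arr.length).map (fun i => s + (arr.take (i + 1)).sum) := by
  induction arr with
  | nil => simp
  | cons a as ih =>
    intro acc s
    simp only [List.foldl_cons, List.length_cons, List.range_succ_eq_map, List.map_cons,
      List.map_map, ih]
    simp [List.append_assoc, Function.comp, add_assoc]

lemma pvPrefixSum_eq (arr : List Int) :
    pvPrefixSum arr = (List.range (arr.length + 1)).map (fun i => (arr.take i).sum) := by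
  rw [pvPrefixSum, pvPrefixSum_fold]
  simp [List.range_succ_eq_map, List.map_map, Function.comp]

lemma pvPrefixSum_length (arr : List Int) : (pvPrefixSum arr).length = arr.length + 1 := by
  simp [pvPrefixSum_eq]

lemma pvPrefixSum_get (arr : List Int) (i : Int) (h0 : 0 ≤ i) (h1 : i ≤ (arr.length : Int)) :
    PySem.List.pyGet? (pvPrefixSum arr) i = some ((arr.take i.toNat).sum) := by
  rw [PySem.List.pyGet?_of_nonneg _ h0, pvPrefixSum_eq]
  rw [List.getElem?_map, List.getElem?_range (by omega)]
  rfl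

lemma sum_drop_take (l : List Int) (a b : Nat) (hab : a ≤ b) :
    ((l.drop a).take (b - a)).sum = (l.take b).sum - (l.take a).sum := by
  have h : l.take b = l.take a ++ (l.drop a).take (b - a) := by
    have h2 := List.take_add (l := l) (i := a) (j := b - a)
    rwa [Nat.add_sub_cancel' hab] at h2
  rw [h, List.sum_append]; ring

-- main loop characterisation (stride ≥ 1, X ≥ 0, H ≥ 1, enough fuel)
lemma pvLoopA_eq (tl : List Int) (H M stride : Int)
    (hM : M ≤ (tl.length : Int) - 2) (hH : 1 ≤ H) (hs : 1 ≤ stride) :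
    ∀ (fuel : Nat) (X : Int) (acc : List Int), 0 ≤ X → M - H - X + 1 ≤ (fuel : Int) →
    pvLoopA (pvPrefixSum tl) H M stride fuel X acc =
      acc ++ (if X + H ≤ M then
        (List.range (PySem.Int.floordiv (M - H - X) stride + 1).toNat).map (fun (i : Nat) =>
          (PySem.List.slice tl (some (X + (i : Int) * stride))
            (some (X + (i : Int) * stride + H - 1))).sum)
      else []) := by
  intro fuel
  induction fuel with
  | zero =>
    intro X acc hX hf
    have hng : ¬ (X + H ≤ M) := by push_cast at hf; omega
    simp [pvLoopA, hng]
  | succ fuel ih =>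
    intro X acc hX hf
    by_cases hc : X + H ≤ M
    · have hlen := pvPrefixSum_length tl
      have hbreak : ¬ (X + H - 2 + 1 ≥ ((pvPrefixSum tl).length : Int)) := by
        rw [hlen]; push_cast; omega
      have hrw : X + H - 2 + 1 = X + H - 1 := by ring
      have hg1 : PySem.List.pyGet? (pvPrefixSum tl) (X + H - 2 + 1)
          = some ((tl.take (X + H - 1).toNat).sum) := by
        rw [hrw]; exact pvPrefixSum_get tl _ (by omega) (by omega)
      have hg2 : PySem.List.pyGet? (pvPrefixSum tl) X = some ((tl.take X.toNat).sum) :=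
        pvPrefixSum_get tl X hX (by omega)
      have hstep : pvLoopA (pvPrefixSum tl) H M stride (fuel + 1) X acc
          = pvLoopA (pvPrefixSum tl) H M stride fuel (X + stride)
              (acc ++ [(tl.take (X + H - 1).toNat).sum - (tl.take X.toNat).sum]) := by
        simp only [pvLoopA, if_pos hc, if_neg hbreak, hg1, hg2]
      rw [hstep, ih (X + stride) _ (by omega) (by push_cast at hf ⊢; omega)]
      rw [if_pos hc]
      have hT : (tl.take (X + H - 1).toNat).sum - (tl.take X.toNat).sum
          = (PySem.List.slice tl (some X) (some (X + H - 1))).sum := by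
        rw [PySem.List.slice_toNat tl hX (by omega), sum_drop_take tl X.toNat (X + H - 1).toNat (by omega)]
      have hdiv : PySem.Int.floordiv (M - H - X) stride = (M - H - X) / stride :=
        PySem.Int.floordiv_eq_ediv_of_pos (by omega)
      by_cases h2 : X + stride + H ≤ M
      · rw [if_pos h2]
        have hdiv2 : PySem.Int.floordiv (M - H - (X + stride)) stride = (M - H - X) / stride - 1 := by
          rw [PySem.Int.floordiv_eq_ediv_of_pos (by omega)]
          have : M - H - (X + stride) = (M - H - X) + (-1) * stride := by ring
          rw [this, Int.add_mul_ediv_right _ _ (by omega : stride ≠ 0)]; omega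
        have hq0 : 0 ≤ (M - H - X) / stride - 1 := by
          have : 1 ≤ (M - H - X) / stride := by
            rw [Int.le_ediv_iff_mul_le (by omega)]; omega
          omega
        have hk : (PySem.Int.floordiv (M - H - X) stride + 1).toNat
            = ((M - H - X) / stride - 1 + 1).toNat + 1 := by
          rw [hdiv]; omega
        rw [hdiv2, hk, List.range_succ_eq_map, List.map_cons, List.map_map]
        simp only [Nat.cast_zero, zero_mul, add_zero, ← hT, List.append_assoc,
          List.singleton_append]
        congr 2
        apply List.map_congr_left
        intro i _
        simp only [Function.comp_apply]
        have e : X + ((i + 1 : Nat) : Int) * stride = X + stride + (i : Int) * stride := by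
          push_cast; ring
        rw [e]
      · rw [if_neg h2]
        have hq : (M - H - X) / stride = 0 :=
          Int.ediv_eq_zero_of_lt (by omega) (by omega)
        rw [hdiv, hq]
        simp [← hT]
    · simp [pvLoopA, hc]

-- ===== VERDICT (by name: the statement is the Claim_ definition above) =====
theorem twin_counts_in_intervals_spec : Claim_equal_twin_counts_in_intervals := by
  intro tl H X_min X_max stride hdom hpre
  unfold Spec_twin_counts_in_intervals twin_counts_in_intervals twin_counts_in_intervals_alt
  simp only []
  by_cases hent : X_min + H ≤ min X_max ((tl.length : Int) - 2)
  · obtain ⟨h0, hH, hs⟩ := hpre hent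
    rw [pvLoopA_eq tl H (min X_max ((tl.length : Int) - 2)) stride (min_le_right _ _) hH hs
      _ _ _ h0 (by rw [Int.toNat_of_nonneg (by omega)])]
    rw [if_pos hent, if_neg (by omega)]
    simp
  · have hA : ∀ fuel, pvLoopA (pvPrefixSum tl) H (min X_max ((tl.length : Int) - 2)) stride fuel X_min [] = [] := by
      intro fuel; cases fuel <;> simp [pvLoopA, hent]
    rw [hA, if_pos (by omega)]
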